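-- pv_equiv track=rewrite | github.com/alvaretto/r-exams_matematicas | Por Temas/Pruebas Estandarizadas/SABER ICFES/SaberICFES_Marzo_2022/P12/generador_contrasenas.py | condicion09
-- ===== SOURCE A (Python) =====
-- def condicion09(contrasena):
--     if contrasena.isupper() or contrasena.islower():
--         return 0
--     elif any(letra.isupper() for letra in contrasena) and any(letra.islower() for letra in contrasena):
--         if sum(letra.isupper() for letra in contrasena) < 2:
--             return 0
--         else:
--             return 1
--     else:
--         return 0
-- ===== SOURCE B (Python) =====
-- def condicion09(contrasena):
--     u = 0
--     l = 0
--     for c in contrasena: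
--         if c.isupper():
--             u += 1
--         elif c.islower():
--             l += 1
--     return 1 if u >= 2 and l >= 1 else 0
-- ===== Notes on version B (the rewrite author's own statement) =====
-- stated objective: simpler
-- what changed: Replaces the whole-string isupper()/islower() guards, two any() scans and a sum() generator by a single loop counting uppercase and lowercase characters followed by the closed-form threshold u>=2 and l>=1, which A's nested branching reduces to.
import Mathlib
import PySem

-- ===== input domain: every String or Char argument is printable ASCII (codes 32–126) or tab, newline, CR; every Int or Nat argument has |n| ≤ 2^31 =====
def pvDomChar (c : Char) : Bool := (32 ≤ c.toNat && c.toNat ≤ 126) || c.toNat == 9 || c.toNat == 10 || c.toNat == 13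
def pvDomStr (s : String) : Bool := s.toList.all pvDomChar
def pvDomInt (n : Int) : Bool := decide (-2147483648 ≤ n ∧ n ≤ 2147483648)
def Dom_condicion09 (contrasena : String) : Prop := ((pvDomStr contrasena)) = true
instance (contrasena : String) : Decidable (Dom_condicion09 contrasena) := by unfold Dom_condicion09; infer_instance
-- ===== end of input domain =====

-- B replaces A's whole-string isupper()/islower() guards, two any() scans and a sum()
-- by one counting loop and the closed-form threshold u ≥ 2 ∧ l ≥ 1 (objective: simpler).

-- ===== PORT A =====
-- str.isupper(): at least one cased char and no lowercase char (exact on the ASCII domain,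
-- where cased = alphabetic); str.islower() symmetric.  Ported by hand, step for step.
def pyStrIsupper (cs : List Char) : Bool :=
  cs.any (fun c => PySem.Chars.isalpha c) && cs.all (fun c => !PySem.Chars.islower c)

def pyStrIslower (cs : List Char) : Bool :=
  cs.any (fun c => PySem.Chars.isalpha c) && cs.all (fun c => !PySem.Chars.isupper c)

def condicion09 (contrasena : String) : Int :=
  let cs := contrasena.toList
  if pyStrIsupper cs || pyStrIslower cs then 0
  else if (cs.any (fun letra => PySem.Chars.isupper letra)) &&
          (cs.any (fun letra => PySem.Chars.islower letra)) then
    if (cs.foldl (fun acc letra => acc + (if PySem.Chars.isupper letra then 1 else 0)) (0 : Int)) < 2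
    then 0 else 1
  else 0

-- ===== PORT B =====
def condicion09_alt (contrasena : String) : Int :=
  let p := contrasena.toList.foldl
    (fun (p : Int × Int) c =>
      if PySem.Chars.isupper c then (p.1 + 1, p.2)
      else if PySem.Chars.islower c then (p.1, p.2 + 1)
      else p) (0, 0)
  if 2 ≤ p.1 && 1 ≤ p.2 then 1 else 0

-- ===== PRECONDITION & SPEC =====
def Spec_condicion09 (contrasena : String) (out : Int) : Prop := out = condicion09_alt contrasena
instance (contrasena : String) (out : Int) : Decidable (Spec_condicion09 contrasena out) := by unfold Spec_condicion09; infer_instance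

-- ===== CLAIM (what is proved, stated in full; the proofs are below) =====
def Claim_equal_condicion09 : Prop := ∀ (contrasena : String), Dom_condicion09 contrasena → Spec_condicion09 contrasena (condicion09 contrasena)

-- ===== LEMMAS AND PROOFS =====

theorem foldl_count_upper (cs : List Char) (a : Int) :
    cs.foldl (fun acc letra => acc + (if PySem.Chars.isupper letra then 1 else 0)) a
      = a + (cs.countP (fun c => PySem.Chars.isupper c) : Int) := by
  induction cs generalizing a with
  | nil => simp
  | cons c cs ih =>
    simp only [List.foldl_cons, ih, List.countP_cons]
    by_cases h : PySem.Chars.isupper c = true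
    · simp [h]; ring
    · simp [h]

theorem foldl_count_pair (cs : List Char) (a b : Int) :
    cs.foldl
      (fun (p : Int × Int) c =>
        if PySem.Chars.isupper c then (p.1 + 1, p.2)
        else if PySem.Chars.islower c then (p.1, p.2 + 1)
        else p) (a, b)
      = (a + (cs.countP (fun c => PySem.Chars.isupper c) : Int),
         b + (cs.countP (fun c => !PySem.Chars.isupper c && PySem.Chars.islower c) : Int)) := by
  induction cs generalizing a b with
  | nil => simp
  | cons c cs ih =>
    simp only [List.foldl_cons, List.countP_cons]
    by_cases hu : PySem.Chars.isupper c = true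
    · simp [hu, ih]; ring
    · by_cases hl : PySem.Chars.islower c = true
      · simp [hu, hl, ih]; ring
      · simp [hu, hl, ih]

theorem not_upper_and_lower (c : Char) (h : PySem.Chars.isupper c = true) :
    PySem.Chars.islower c = false := by
  simp [PySem.Chars.isupper, PySem.Chars.islower, Char.le_def, UInt32.le_iff_toNat_le] at *
  omega

theorem countL_eq (cs : List Char) :
    cs.countP (fun c => !PySem.Chars.isupper c && PySem.Chars.islower c)
      = cs.countP (fun c => PySem.Chars.islower c) := by
  apply List.countP_congr
  intro c _
  by_cases h : PySem.Chars.isupper c = true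
  · simp [h, not_upper_and_lower c h]
  · simp [h]

-- ===== VERDICT (by name: the statement is the Claim_ definition above) =====
theorem condicion09_spec : Claim_equal_condicion09 := by
  intro s _
  unfold Spec_condicion09 condicion09 condicion09_alt
  simp only []
  generalize s.toList = cs
  rw [foldl_count_pair, foldl_count_upper, countL_eq]
  set U := cs.countP (fun c => PySem.Chars.isupper c) with hU
  set L := cs.countP (fun c => PySem.Chars.islower c) with hL
  by_cases hmix : 2 ≤ U ∧ 1 ≤ L
  · obtain ⟨h2, h1⟩ := hmix
    obtain ⟨cu, hcu, hpu⟩ := List.countP_pos_iff.mp (show 0 < U by omega)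
    obtain ⟨cl, hcl, hpl⟩ := List.countP_pos_iff.mp (show 0 < L by omega)
    have hanyU : (cs.any fun letra => PySem.Chars.isupper letra) = true :=
      List.any_eq_true.mpr ⟨cu, hcu, hpu⟩
    have hanyL : (cs.any fun letra => PySem.Chars.islower letra) = true :=
      List.any_eq_true.mpr ⟨cl, hcl, hpl⟩
    have hnotSU : pyStrIsupper cs = false := by
      unfold pyStrIsupper
      have h1' : cs.all (fun c => !PySem.Chars.islower c) = false := by
        rw [List.all_eq_false]
        exact ⟨cl, hcl, by simp [hpl]⟩
      simp [h1']
    have hnotSL : pyStrIslower cs = false := by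
      unfold pyStrIslower
      have h1' : cs.all (fun c => !PySem.Chars.isupper c) = false := by
        rw [List.all_eq_false]
        exact ⟨cu, hcu, by simp [hpu]⟩
      simp [h1']
    rw [if_neg (by simp [hnotSU, hnotSL]),
        if_pos (by simp [hanyU, hanyL]),
        if_neg (show ¬ ((0 : Int) + (U : Int) < 2) by omega),
        if_pos (show (decide ((2:Int) ≤ 0 + (U:Int)) && decide ((1:Int) ≤ 0 + (L:Int))) = true by
          simp; constructor <;> omega)]
  · rw [if_neg (show ¬ ((decide ((2:Int) ≤ 0 + (U:Int)) && decide ((1:Int) ≤ 0 + (L:Int))) = true) by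
      simp; intro h2; omega)]
    split
    · rfl
    · split
      · rename_i hany
        rw [Bool.and_eq_true] at hany
        obtain ⟨cl, hcl, hpl⟩ := List.any_eq_true.mp hany.2
        have hLpos : 1 ≤ L := List.countP_pos_iff.mpr ⟨cl, hcl, hpl⟩
        have hU2 : ¬ (2 ≤ U) := fun h => hmix ⟨h, hLpos⟩
        rw [if_pos (show (0 : Int) + (U : Int) < 2 by omega)]
      · rfl
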